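-- pv_equiv track=rewrite | github.com/Vinomo4/Cryptography | 2 - Secret Key/Exercise 2/GF.py | GF_es_generador
-- ===== SOURCE A (Python) =====
-- m = 0b100011101
--
-- def multiply_by_x(B):
--     '''
--     Function that mutiplies by our g^1 = x.
--     '''
--     aux = B << 1
--     if aux > 255:
--         aux = aux ^ m
--     return aux
--
-- def GF_product_p(a,b):
--     '''
--     Function that performs the polynomial multiplication between two given integers
--     from GF(256).
--     '''
--     # First, we check if one of both integers is 0.
--     if not a or not b:
--         return 0
--     # We check if one of the values is the neutral element of the multiplication.
--     if a == 1 or b == 1: return max(a,b)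
--     # First, we initialize our auxiliary value  as a[0]*b.
--     aux = a%2*b
--     # Then, we iterate for the a bits. If we found one = 1, we perform the polinomial multiplication
--     # which consists in applying the multiplication_by_x function as many times as the bit index.
--     for i in range(1,8):
--         a = a >> 1
--         if a%2:
--             temp_result = b
--             for j in range(i):
--                 temp_result = multiply_by_x(temp_result)
--             aux = aux ^ temp_result
--     return aux
--
-- def GF_es_generador(a):
--     '''
--     Function that checks if the provided integer is a generator of a GF(256).
--     '''
--     if not a or a == 1: return False
--     pos_gen_table = [0 for i in range(255)]
--     pos_gen_table[0] = 1
--     pos_gen_table[1] = a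
--     for i in range(2,255):
--         pos_gen_table[i] = GF_product_p(a,pos_gen_table[i-1])
--     # In order to check that a is a generator in the GF(256), all its different powers
--     # module m should be different. To obtain the number of different values, we will use a set.
--     if  len(set(pos_gen_table))!= len(pos_gen_table): return False
--     # All the powers are different!..
--     return True
-- ===== SOURCE B (Python) =====
-- m = 0b100011101
--
-- def _multx(B):
--     aux = B << 1
--     return aux ^ m if aux > 255 else aux
--
-- def _gf_mul(a, b):
--     # Russian-peasant style: keep one running multiple of b instead of
--     # recomputing multiply_by_x^i(b) from scratch for every set bit.
--     if not a or not b: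
--         return 0
--     if a == 1 or b == 1:
--         return max(a, b)
--     res = 0
--     bits = a
--     cur = b
--     for _ in range(8):
--         if bits % 2:
--             res ^= cur
--         bits >>= 1
--         cur = _multx(cur)
--     return res
--
-- def GF_es_generador(a):
--     # Single pass with a seen-set and early exit on the first repeated power,
--     # instead of materialising all 255 powers and comparing set/list sizes.
--     if not a or a == 1:
--         return False
--     seen = {1}
--     x = a
--     for _ in range(254):
--         if x in seen:
--             return False
--         seen.add(x)
--         x = _gf_mul(a, x)
--     return True
-- ===== Notes on version B (the rewrite author's own statement) =====
-- stated objective: faster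
-- what changed: B replaces A's materialise-all-255-powers-then-compare-set-size check by a single pass with a seen-set that exits on the first repeated power, and replaces A's per-bit inner loop (recomputing multiply_by_x^i(b) from b each time) by a Russian-peasant multiplication that carries one running multiple.
import Mathlib
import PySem

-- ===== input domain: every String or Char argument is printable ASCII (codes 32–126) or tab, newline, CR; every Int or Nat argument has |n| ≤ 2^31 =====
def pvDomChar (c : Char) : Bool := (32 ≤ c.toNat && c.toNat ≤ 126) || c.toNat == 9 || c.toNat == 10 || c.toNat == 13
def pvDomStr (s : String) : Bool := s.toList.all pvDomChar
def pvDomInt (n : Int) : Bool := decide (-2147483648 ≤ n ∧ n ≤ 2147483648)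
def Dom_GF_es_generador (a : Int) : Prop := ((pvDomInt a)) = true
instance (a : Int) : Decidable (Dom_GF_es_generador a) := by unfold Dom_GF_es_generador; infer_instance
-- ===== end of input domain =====

-- B: one pass with a seen-set and early exit instead of building all 255 powers, and an
-- incremental (Russian-peasant) field multiplication instead of A's nested per-bit loop.

-- ===== PORT A =====
def multiply_by_x (B : Int) : Int :=
  let aux := B * 2                        -- B << 1 on Int is 2*B (exact, also for negatives)
  if aux > 255 then PySem.Int.bxor aux 285 else aux

def GF_product_p (a b : Int) : Int :=
  if a = 0 ∨ b = 0 then 0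
  else if a = 1 ∨ b = 1 then max a b
  else
    let aux := (PySem.Int.mod a 2) * b
    let st := (PySem.List.pyRange 1 8 1).foldl
      (fun (st : Int × Int) i =>
        let a1 := PySem.Int.floordiv st.1 2      -- a = a >> 1
        (a1, if PySem.Int.mod a1 2 ≠ 0 then
          PySem.Int.bxor st.2 ((PySem.List.pyRange 0 i 1).foldl (fun t _ => multiply_by_x t) b)
        else st.2)) (a, aux)
    st.2

def pvStepA (a : Int) (t : List Int) (i : Int) : List Int :=
  PySem.List.pySetD t i (GF_product_p a (PySem.List.pyGetD t (i - 1) 0))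

def GF_es_generador (a : Int) : Bool :=
  if a = 0 ∨ a = 1 then false
  else
    let t0 := ((List.replicate 255 (0 : Int)).set 0 1).set 1 a
    let table := (PySem.List.pyRange 2 255 1).foldl (pvStepA a) t0
    if PySem.Set.len (PySem.Set.ofList table) ≠ PySem.List.len table then false else true

-- ===== PORT B =====
def gfMulAlt (a b : Int) : Int :=
  if a = 0 ∨ b = 0 then 0
  else if a = 1 ∨ b = 1 then max a b
  else
    let st := (PySem.List.pyRange 0 8 1).foldl
      (fun (st : Int × Int × Int) _ =>
        let res := if PySem.Int.mod st.2.1 2 ≠ 0 then PySem.Int.bxor st.1 st.2.2 else st.1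
        (res, PySem.Int.floordiv st.2.1 2, multiply_by_x st.2.2))
      (0, a, b)
    st.1

def altLoop (a : Int) : Nat → PySem.Set Int → Int → Bool
  | 0, _, _ => true
  | n + 1, seen, x =>
    if PySem.Set.contains seen x then false
    else altLoop a n (PySem.Set.add seen x) (gfMulAlt a x)

def GF_es_generador_alt (a : Int) : Bool :=
  if a = 0 ∨ a = 1 then false
  else altLoop a 254 (PySem.Set.ofList [1]) a

-- ===== PRECONDITION & SPEC =====
def Spec_GF_es_generador (a : Int) (out : Bool) : Prop := out = GF_es_generador_alt a
instance (a : Int) (out : Bool) : Decidable (Spec_GF_es_generador a out) := by unfold Spec_GF_es_generador; infer_instance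

-- ===== CLAIM (what is proved, stated in full; the proofs are below) =====
def Claim_equal_GF_es_generador : Prop := ∀ (a : Int), Dom_GF_es_generador a → Spec_GF_es_generador a (GF_es_generador a)

-- ===== LEMMAS AND PROOFS =====

theorem zero_bxor (x : Int) : PySem.Int.bxor 0 x = x := by
  rw [PySem.Int.bxor_comm, PySem.Int.bxor_zero]

theorem mul_eq (a b : Int) : GF_product_p a b = gfMulAlt a b := by
  unfold GF_product_p gfMulAlt
  split_ifs with h1 h2
  · rfl
  · rfl
  · have hr1 : PySem.List.pyRange 1 8 1 = [1,2,3,4,5,6,7] := by decide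
    have hr0 : PySem.List.pyRange 0 8 1 = [0,1,2,3,4,5,6,7] := by decide
    have e1 : PySem.List.pyRange 0 1 1 = [0] := by decide
    have e2 : PySem.List.pyRange 0 2 1 = [0,1] := by decide
    have e3 : PySem.List.pyRange 0 3 1 = [0,1,2] := by decide
    have e4 : PySem.List.pyRange 0 4 1 = [0,1,2,3] := by decide
    have e5 : PySem.List.pyRange 0 5 1 = [0,1,2,3,4] := by decide
    have e6 : PySem.List.pyRange 0 6 1 = [0,1,2,3,4,5] := by decide
    have e7 : PySem.List.pyRange 0 7 1 = [0,1,2,3,4,5,6] := by decide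
    rw [hr1, hr0]
    simp only [List.foldl, e1, e2, e3, e4, e5, e6, e7]
    rcases PySem.Int.mod_two_eq a with hm | hm <;>
      simp only [hm, one_mul, zero_mul, ne_eq, not_true_eq_false, not_false_eq_true,
        if_true, if_false, one_ne_zero, zero_bxor]

-- the power sequence A tabulates: pw a 0 = 1, pw a 1 = a, pw a (n+2) = a * pw a (n+1) in GF
def pw (a : Int) : Nat → Int
  | 0 => 1
  | 1 => a
  | n + 2 => gfMulAlt a (pw a (n + 1))

-- the list of iterates B walks through
def itl (a : Int) : Nat → Int → List Int
  | 0, _ => []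
  | n + 1, x => x :: itl a n (gfMulAlt a x)

theorem pw_succ (a : Int) (k : Nat) (hk : 2 ≤ k) :
    pw a k = gfMulAlt a (pw a (k - 1)) := by
  obtain ⟨j, rfl⟩ : ∃ j, k = j + 2 := ⟨k - 2, by omega⟩
  rfl

theorem table_eq (a : Int) : ∀ (n k : Nat), k + n = 255 → 2 ≤ k →
    (PySem.List.pyRange (k : Int) 255 1).foldl (pvStepA a)
      ((List.range k).map (pw a) ++ List.replicate n 0)
    = (List.range 255).map (pw a)
  | 0, k, hkn, hk => by
      have hx : k = 255 := by omega
      subst hx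
      rw [PySem.List.pyRange_one_eq_nil (by norm_num)]
      simp [List.foldl]
  | n + 1, k, hkn, hk => by
      have hklt : (k : Int) < 255 := by exact_mod_cast (by omega : k < 255)
      rw [PySem.List.pyRange_one_cons hklt, List.foldl_cons]
      have hlen : ((List.range k).map (pw a)).length = k := by simp
      have hstep : pvStepA a ((List.range k).map (pw a) ++ List.replicate (n + 1) 0) (k : Int)
          = (List.range (k + 1)).map (pw a) ++ List.replicate n 0 := by
        unfold pvStepA
        have hidx : (k : Int) - 1 = ((k - 1 : Nat) : Int) := by push_cast [Nat.cast_sub (by omega : 1 ≤ k)]; ring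
        rw [hidx, PySem.List.pySetD_natCast, PySem.List.pyGetD_natCast]
        have hget : (((List.range k).map (pw a) ++ List.replicate (n + 1) 0).getD (k - 1) 0) = pw a (k - 1) := by
          rw [List.getD_append _ _ _ _ (by simp; omega)]
          simp [List.getD_eq_getElem?_getD, List.getElem?_map, List.getElem?_range (by omega : k - 1 < k)]
        rw [hget, mul_eq, ← pw_succ a k hk]
        rw [List.set_append]
        simp only [hlen, lt_irrefl, Nat.sub_self]
        rw [List.replicate_succ, List.set_cons_zero, List.range_succ, List.map_append]
        simp
      rw [hstep]
      have hc : (k : Int) + 1 = ((k + 1 : Nat) : Int) := by push_cast; ring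
      rw [hc]
      exact table_eq a n (k + 1) (by omega) (by omega)

theorem contains_iff (s : PySem.Set Int) (x : Int) :
    PySem.Set.contains s x = true ↔ x ∈ s := by
  simp [PySem.Set.contains]

theorem loop_iff (a : Int) : ∀ (n : Nat) (seen : PySem.Set Int) (x : Int),
    altLoop a n seen x = true ↔ ((itl a n x).Nodup ∧ ∀ y ∈ itl a n x, y ∉ seen)
  | 0, seen, x => by simp [altLoop, itl]
  | n + 1, seen, x => by
      rw [altLoop]
      by_cases hc : x ∈ seen
      · rw [if_pos ((contains_iff seen x).mpr hc)]
        simp only [itl, List.nodup_cons, List.mem_cons]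
        constructor
        · intro h; cases h
        · rintro ⟨_, h⟩; exact absurd hc (h x (Or.inl rfl))
      · rw [if_neg (by simp [PySem.Set.contains, hc])]
        rw [loop_iff a n (PySem.Set.add seen x) (gfMulAlt a x)]
        simp only [itl, List.nodup_cons, List.mem_cons]
        constructor
        · rintro ⟨hnd, hmem⟩
          refine ⟨⟨fun hx => ?_, hnd⟩, ?_⟩
          · exact (hmem x hx) ((PySem.Set.mem_add seen x x).mpr (Or.inr rfl))
          · rintro y (rfl | hy)
            · exact hc
            · intro hys
              exact (hmem y hy) ((PySem.Set.mem_add seen x y).mpr (Or.inl hys))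
        · rintro ⟨⟨hx, hnd⟩, hmem⟩
          refine ⟨hnd, fun y hy hys => ?_⟩
          rcases (PySem.Set.mem_add seen x y).mp hys with hys | rfl
          · exact (hmem y (Or.inr hy)) hys
          · exact hx hy

theorem itl_pw (a : Int) : ∀ (n k : Nat), 1 ≤ k →
    itl a n (pw a k) = (List.range n).map (fun i => pw a (k + i))
  | 0, k, hk => by simp [itl]
  | n + 1, k, hk => by
      have hstep : gfMulAlt a (pw a k) = pw a (k + 1) := by
        rw [pw_succ a (k + 1) (by omega)]
        simp
      rw [itl, hstep, itl_pw a n (k + 1) (by omega), List.range_succ_eq_map]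
      simp only [List.map_cons, List.map_map, Nat.add_zero]
      congr 1
      apply List.map_congr_left
      intro i _
      simp only [Function.comp_apply]
      congr 1
      omega

theorem add_len_le (s : PySem.Set Int) (x : Int) :
    (PySem.Set.add s x).length ≤ s.length + 1 := by
  unfold PySem.Set.add
  split_ifs <;> simp

theorem foldl_add_len_le (xs : List Int) : ∀ (s : List Int),
    (xs.foldl PySem.Set.add s).length ≤ s.length + xs.length := by
  induction xs with
  | nil => intro s; simp
  | cons x t ih =>
      intro s
      calc (List.foldl PySem.Set.add (PySem.Set.add s x) t).length
          ≤ (PySem.Set.add s x).length + t.length := ih _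
        _ ≤ s.length + (x :: t).length := by
            have := add_len_le s x
            simp only [List.length_cons]
            omega

theorem foldl_add_nodup (xs : List Int) : xs.Nodup → ∀ (s : List Int),
    (∀ x ∈ xs, x ∉ s) → xs.foldl PySem.Set.add s = s ++ xs := by
  induction xs with
  | nil => intro _ s _; simp
  | cons x t ih =>
      intro hnd s hdisj
      rw [List.nodup_cons] at hnd
      have hxns : x ∉ s := hdisj x (List.mem_cons_self)
      have hadd : PySem.Set.add s x = s ++ [x] := by
        unfold PySem.Set.add
        rw [if_neg (by simp [PySem.Set.contains, hxns])]
      rw [List.foldl_cons, hadd, ih hnd.2]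
      · simp
      · intro y hy
        simp only [List.mem_append, List.mem_singleton]
        rintro (hys | rfl)
        · exact hdisj y (List.mem_cons_of_mem _ hy) hys
        · exact hnd.1 hy

theorem foldl_add_lt (xs : List Int) : ∀ (s : List Int),
    (¬ xs.Nodup ∨ ∃ x ∈ xs, x ∈ s) →
    (xs.foldl PySem.Set.add s).length < s.length + xs.length := by
  induction xs with
  | nil =>
      rintro s (h | ⟨x, hx, _⟩)
      · exact absurd List.nodup_nil h
      · cases hx
  | cons x t ih =>
      rintro s hbad
      rw [List.foldl_cons]
      by_cases hxs : x ∈ s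
      · have hadd : PySem.Set.add s x = s := by
          unfold PySem.Set.add
          rw [if_pos ((contains_iff s x).mpr hxs)]
        rw [hadd]
        have := foldl_add_len_le t s
        simp only [List.length_cons]
        omega
      · have hadd : PySem.Set.add s x = s ++ [x] := by
          unfold PySem.Set.add
          rw [if_neg (by simp [PySem.Set.contains, hxs])]
        rw [hadd]
        have hrec : ¬ t.Nodup ∨ ∃ y ∈ t, y ∈ s ++ [x] := by
          rcases hbad with hbad | ⟨y, hy, hys⟩
          · rw [List.nodup_cons] at hbad
            push Not at hbad
            by_cases hxt : x ∈ t
            · exact Or.inr ⟨x, hxt, by simp⟩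
            · exact Or.inl (by tauto)
          · rcases List.mem_cons.mp hy with rfl | hyt
            · exact absurd hys hxs
            · exact Or.inr ⟨y, hyt, by simp [hys]⟩
        have h2 := ih (s ++ [x]) hrec
        have h3 : (s ++ [x]).length = s.length + 1 := by simp
        rw [h3] at h2
        simp only [List.length_cons]
        omega

theorem ofList_len_eq_iff (xs : List Int) :
    ((PySem.Set.ofList xs).length = xs.length) ↔ xs.Nodup := by
  rw [PySem.Set.ofList_eq_foldl]
  constructor
  · intro h
    by_contra hnd
    have := foldl_add_lt xs [] (Or.inl hnd)
    simp at this
    omega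
  · intro hnd
    rw [foldl_add_nodup xs hnd [] (by simp)]
    simp

set_option maxRecDepth 8192 in
theorem hL_aux (a : Int) : (List.range 255).map (pw a) = 1 :: itl a 254 a := by
  have h1 : itl a 254 a = (List.range 254).map (fun i => pw a (1 + i)) := by
    have := itl_pw a 254 1 (le_refl 1)
    simpa [pw] using this
  rw [h1, show (255 : Nat) = 254 + 1 from rfl, List.range_succ_eq_map]
  simp only [List.map_cons, List.map_map]
  congr 1

-- ===== VERDICT (by name: the statement is the Claim_ definition above) =====
set_option maxRecDepth 8192 in
set_option maxHeartbeats 1000000 in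
theorem GF_es_generador_spec : Claim_equal_GF_es_generador := by
  unfold Claim_equal_GF_es_generador Spec_GF_es_generador
  intro a _
  unfold GF_es_generador GF_es_generador_alt
  by_cases h : a = 0 ∨ a = 1
  · rw [if_pos h, if_pos h]
  · rw [if_neg h, if_neg h]
    dsimp only
    have h0 : ((List.replicate 255 (0 : Int)).set 0 1).set 1 a
        = (List.range 2).map (pw a) ++ List.replicate 253 0 := by
      have e : ((List.replicate 255 (0 : Int)).set 0 1).set 1 a
          = 1 :: a :: List.replicate 253 0 := rfl
      rw [e]
      simp [List.range_succ, pw]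
    have htab : (PySem.List.pyRange 2 255 1).foldl (pvStepA a)
        (((List.replicate 255 (0 : Int)).set 0 1).set 1 a) = (List.range 255).map (pw a) := by
      rw [h0]
      have h2 := table_eq a 253 2 (by norm_num) (by norm_num)
      have hc2 : ((2 : Nat) : Int) = 2 := by norm_num
      rw [hc2] at h2
      exact h2
    rw [htab]
    have key : ((1 : Int) :: itl a 254 a).Nodup ↔ altLoop a 254 [1] a = true := by
      rw [loop_iff a 254 [1] a, List.nodup_cons]
      constructor
      · rintro ⟨h1, h2⟩
        refine ⟨h2, fun y hy hys => ?_⟩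
        rw [List.mem_singleton] at hys
        subst hys
        exact h1 hy
      · rintro ⟨h1, h2⟩
        exact ⟨fun hc => h2 1 hc (List.mem_singleton_self 1), h1⟩
    have hofl : PySem.Set.ofList [(1 : Int)] = [1] := rfl
    rw [hofl]
    split_ifs with hc
    · have hnd : ¬ ((List.range 255).map (pw a)).Nodup := by
        intro hnd
        apply hc
        simp only [PySem.Set.len, PySem.List.len]
        exact Nat.cast_inj.mpr ((ofList_len_eq_iff _).mpr hnd)
      rcases Bool.eq_false_or_eq_true (altLoop a 254 [1] a) with hb | hb
      · exact absurd (by rw [hL_aux a]; exact key.mpr hb) hnd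
      · exact hb.symm
    · push Not at hc
      have hnd : ((List.range 255).map (pw a)).Nodup := by
        apply (ofList_len_eq_iff _).mp
        simp only [PySem.Set.len, PySem.List.len] at hc
        exact Nat.cast_inj.mp hc
      exact (key.mp (by rw [← hL_aux a]; exact hnd)).symm
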